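-- pv_equiv track=rewrite | github.com/annejong/ProPr54 | scripts/Webserver.py | create_filtered_fasta
-- ===== SOURCE A (Python) =====
-- def create_filtered_fasta(fasta_dict, sequence_list):
--     # Uses a FASTA file and looks if sequence list in FASTA. If it is then appends to new dictionary
--     filtered_fasta = {}
--     unique_seqs = set()
--     for header, seq in fasta_dict.items():
--         for s in sequence_list:
--             if s in seq and seq not in unique_seqs:
--                 filtered_fasta[header] = seq
--                 unique_seqs.add(seq)
--                 break
--     return filtered_fasta
-- ===== SOURCE B (Python) =====
-- def create_filtered_fasta(fasta_dict, sequence_list):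
--     # Phase 1: deduplicate by sequence, keeping the first header of each distinct sequence.
--     first_by_seq = {}
--     for header, seq in fasta_dict.items():
--         if seq not in first_by_seq:
--             first_by_seq[seq] = header
--     # Phase 2: keep the distinct sequences that contain any query substring.
--     return {header: seq for seq, header in first_by_seq.items()
--             if any(s in seq for s in sequence_list)}
-- ===== Notes on version B (the rewrite author's own statement) =====
-- stated objective: faster
-- what changed: A filters in one nested loop with a seen-set and a per-entry break; B first deduplicates by sequence into a first-header dict (one pass, no substring tests), then filters only the distinct sequences with any(), so substring scans run once per distinct sequence instead of once per entry.
import Mathlib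
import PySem

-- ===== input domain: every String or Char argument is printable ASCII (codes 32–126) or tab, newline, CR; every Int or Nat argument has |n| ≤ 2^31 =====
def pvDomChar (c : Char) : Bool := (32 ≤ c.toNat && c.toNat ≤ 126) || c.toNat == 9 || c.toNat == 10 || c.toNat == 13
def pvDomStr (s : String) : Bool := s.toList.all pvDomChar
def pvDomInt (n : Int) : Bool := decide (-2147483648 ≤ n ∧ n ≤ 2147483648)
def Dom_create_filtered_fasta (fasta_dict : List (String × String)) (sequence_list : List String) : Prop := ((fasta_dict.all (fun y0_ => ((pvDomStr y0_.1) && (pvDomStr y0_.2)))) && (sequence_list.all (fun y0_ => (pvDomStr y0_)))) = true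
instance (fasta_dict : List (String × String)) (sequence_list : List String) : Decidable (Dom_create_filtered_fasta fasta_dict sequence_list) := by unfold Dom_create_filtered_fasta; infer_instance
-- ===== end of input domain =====

-- B replaces A's filter-with-seen-set nested loop by two phases (dedupe by sequence first, then
-- substring-filter only the distinct sequences); measurably faster on duplicate-heavy inputs.

-- ===== PORT A =====
-- inner 'for s in sequence_list: … break' loop of A
def pvLoopA (header seq : String) (st : PySem.Dict String String × PySem.Set String) :
    List String → PySem.Dict String String × PySem.Set String
  | [] => st
  | s :: rest =>
    if PySem.Str.isIn s seq && !(PySem.Set.contains st.2 seq) then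
      (st.1.insert header seq, PySem.Set.add st.2 seq)
    else
      pvLoopA header seq st rest

def create_filtered_fasta (fasta_dict : List (String × String)) (sequence_list : List String) : List (String × String) :=
  (fasta_dict.foldl (fun st p => pvLoopA p.1 p.2 st sequence_list)
    ((PySem.Dict.empty : PySem.Dict String String), (PySem.Set.empty : PySem.Set String))).1.items

-- ===== PORT B =====
def create_filtered_fasta_alt (fasta_dict : List (String × String)) (sequence_list : List String) : List (String × String) :=
  -- phase 1: first_by_seq = {seq: header, first occurrence wins}
  -- phase 2: the dict comprehension {header: seq for seq, header in first_by_seq.items() if any(...)}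
  ((fasta_dict.foldl (fun d p => if d.contains p.2 then d else d.insert p.2 p.1)
      (PySem.Dict.empty : PySem.Dict String String)).items.foldl
    (fun (d : PySem.Dict String String) p =>
      if sequence_list.any (fun s => PySem.Str.isIn s p.1) then d.insert p.2 p.1 else d)
    PySem.Dict.empty).items

-- ===== PRECONDITION & SPEC =====
-- Python's fasta_dict is a dict, so its keys (headers) are necessarily distinct; Pre_ states
-- exactly that well-formedness of the association-list encoding (no input A accepts is excluded).
def Pre_create_filtered_fasta (fasta_dict : List (String × String)) (sequence_list : List String) : Prop :=
  (fasta_dict.map Prod.fst).Nodup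

instance (fasta_dict : List (String × String)) (sequence_list : List String) : Decidable (Pre_create_filtered_fasta fasta_dict sequence_list) := by unfold Pre_create_filtered_fasta; infer_instance

def pvWitness_create_filtered_fasta : (List (String × String)) × List String :=
  ([("h1", "ACGT"), ("h2", "TTTT")], ["CG"])

def Spec_create_filtered_fasta (fasta_dict : List (String × String)) (sequence_list : List String) (out : List (String × String)) : Prop := out = create_filtered_fasta_alt fasta_dict sequence_list
instance (fasta_dict : List (String × String)) (sequence_list : List String) (out : List (String × String)) : Decidable (Spec_create_filtered_fasta fasta_dict sequence_list out) := by unfold Spec_create_filtered_fasta; infer_instance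

-- ===== CLAIM (what is proved, stated in full; the proofs are below) =====
def Claim_equal_create_filtered_fasta : Prop := ∀ (fasta_dict : List (String × String)) (sequence_list : List String), Dom_create_filtered_fasta fasta_dict sequence_list → Pre_create_filtered_fasta fasta_dict sequence_list → Spec_create_filtered_fasta fasta_dict sequence_list (create_filtered_fasta fasta_dict sequence_list)

-- ===== LEMMAS AND PROOFS =====

-- reference: first occurrence of each sequence, as (seq, header) pairs in order
def pvRefAll (seen : List String) : List (String × String) → List (String × String)
  | [] => []
  | (h, q) :: rest =>
    if q ∈ seen then pvRefAll seen rest else (q, h) :: pvRefAll (q :: seen) rest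

-- A's inner loop in closed form (the seen-set does not change while it runs)
theorem pvLoopA_eq (header seq : String) (st : PySem.Dict String String × PySem.Set String)
    (l : List String) :
    pvLoopA header seq st l =
      if l.any (fun s => PySem.Str.isIn s seq) && !(PySem.Set.contains st.2 seq) then
        (st.1.insert header seq, PySem.Set.add st.2 seq)
      else st := by
  induction l with
  | nil => simp [pvLoopA]
  | cons s rest ih =>
    rw [pvLoopA, ih]
    cases hs : PySem.Chars.isIn s.toList seq.toList <;> cases hc : PySem.Set.contains st.2 seq <;>
      simp [List.any_cons, hs, hc]

-- invariant for A's outer loop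
theorem pvA_inv (sl : List String) (fd : List (String × String))
    (st : PySem.Dict String String × PySem.Set String) (seen : List String)
    (hinv : ∀ q, PySem.Set.contains st.2 q = true ↔ (q ∈ seen ∧ (sl.any (fun s => PySem.Str.isIn s q)) = true))
    (hfresh : ∀ p ∈ fd, st.1.contains p.1 = false)
    (hnd : (fd.map Prod.fst).Nodup) :
    (fd.foldl (fun st p => pvLoopA p.1 p.2 st sl) st).1.items =
      st.1.items ++ ((pvRefAll seen fd).filter (fun p => sl.any (fun s => PySem.Str.isIn s p.1))).map (fun p => (p.2, p.1)) := by
  induction fd generalizing st seen with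
  | nil => simp [pvRefAll]
  | cons p rest ih =>
    obtain ⟨h, q⟩ := p
    simp only [List.map_cons, List.nodup_cons, List.mem_map] at hnd
    simp only [List.foldl_cons]
    rw [pvLoopA_eq h q st sl, pvRefAll]
    by_cases hqs : q ∈ seen
    · -- q already seen: A skips, ref skips
      rw [if_pos hqs]
      by_cases hm : (sl.any (fun s => PySem.Str.isIn s q)) = true
      · have hc : PySem.Set.contains st.2 q = true := (hinv q).mpr ⟨hqs, hm⟩
        have hC : ((sl.any (fun s => PySem.Str.isIn s q)) && !(PySem.Set.contains st.2 q)) = false := by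
          rw [hc, hm]; rfl
        rw [hC, if_neg Bool.false_ne_true]
        exact ih st seen hinv (fun p hp => hfresh p (List.mem_cons_of_mem _ hp)) hnd.2
      · rw [Bool.not_eq_true] at hm
        have hC : ((sl.any (fun s => PySem.Str.isIn s q)) && !(PySem.Set.contains st.2 q)) = false := by
          rw [hm]; rfl
        rw [hC, if_neg Bool.false_ne_true]
        exact ih st seen hinv (fun p hp => hfresh p (List.mem_cons_of_mem _ hp)) hnd.2
    · -- q not yet seen
      rw [if_neg hqs]
      have hc : PySem.Set.contains st.2 q = false := by
        cases hcv : PySem.Set.contains st.2 q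
        · rfl
        · exact absurd ((hinv q).mp hcv).1 hqs
      by_cases hm : (sl.any (fun s => PySem.Str.isIn s q)) = true
      · -- matched: A inserts, ref emits and the filter keeps it
        have hC : ((sl.any (fun s => PySem.Str.isIn s q)) && !(PySem.Set.contains st.2 q)) = true := by
          rw [hc, hm]; rfl
        rw [hC, if_pos rfl]
        rw [List.filter_cons,
          show (sl.any fun s => PySem.Str.isIn s ((q, h) : String × String).1) = true from hm,
          if_pos rfl]
        simp only [List.map_cons]
        have hfr : st.1.contains h = false := hfresh (h, q) List.mem_cons_self
        rw [ih (st.1.insert h q, PySem.Set.add st.2 q) (q :: seen)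
          (by
            intro q'
            simp only [PySem.Set.contains_iff, PySem.Set.mem_add, List.mem_cons]
            constructor
            · rintro (hmem | rfl)
              · have := (hinv q').mp ((PySem.Set.contains_iff _ _).mpr hmem)
                exact ⟨Or.inr this.1, this.2⟩
              · exact ⟨Or.inl rfl, hm⟩
            · rintro ⟨(rfl | hseen), hmq⟩
              · exact Or.inr rfl
              · exact Or.inl ((PySem.Set.contains_iff _ _).mp ((hinv q').mpr ⟨hseen, hmq⟩)))
          (by
            intro p' hp'
            rw [PySem.Dict.contains_insert]
            have h1 : (p'.1 == h) = false := by
              simp only [beq_eq_false_iff_ne, ne_eq]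
              intro heq
              exact hnd.1 ⟨p', hp', heq⟩
            rw [h1, hfresh p' (List.mem_cons_of_mem _ hp')]; rfl)
          hnd.2]
        rw [PySem.Dict.items_insert_of_not_contains _ _ hfr]
        simp
      · -- unmatched: A skips, ref emits but the filter drops it
        rw [Bool.not_eq_true] at hm
        have hC : ((sl.any (fun s => PySem.Str.isIn s q)) && !(PySem.Set.contains st.2 q)) = false := by
          rw [hm]; rfl
        rw [hC, if_neg Bool.false_ne_true]
        rw [List.filter_cons,
          show (sl.any fun s => PySem.Str.isIn s ((q, h) : String × String).1) = false from hm,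
          if_neg Bool.false_ne_true]
        exact ih st (q :: seen)
          (by
            intro q'
            rw [hinv q']
            constructor
            · rintro ⟨hseen, hmq⟩; exact ⟨List.mem_cons_of_mem _ hseen, hmq⟩
            · rintro ⟨hmem, hmq⟩
              rcases List.mem_cons.mp hmem with rfl | hseen
              · rw [hm] at hmq; cases hmq
              · exact ⟨hseen, hmq⟩)
          (fun p hp => hfresh p (List.mem_cons_of_mem _ hp)) hnd.2

-- invariant for B's first pass: it collects exactly pvRefAll
theorem pvB1 (fd : List (String × String)) (d : PySem.Dict String String) (seen : List String)
    (hinv : ∀ q, d.contains q = true ↔ q ∈ seen) :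
    (fd.foldl (fun d p => if d.contains p.2 then d else d.insert p.2 p.1) d).items =
      d.items ++ pvRefAll seen fd := by
  induction fd generalizing d seen with
  | nil => simp [pvRefAll]
  | cons p rest ih =>
    obtain ⟨h, q⟩ := p
    simp only [List.foldl_cons]
    rw [pvRefAll]
    by_cases hqs : q ∈ seen
    · rw [if_pos ((hinv q).mpr hqs), if_pos hqs]
      exact ih d seen hinv
    · have hc : d.contains q = false := by
        cases hcv : d.contains q
        · rfl
        · exact absurd ((hinv q).mp hcv) hqs
      rw [hc, if_neg Bool.false_ne_true, if_neg hqs]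
      rw [ih (d.insert q h) (q :: seen)
        (by
          intro q'
          rw [PySem.Dict.contains_insert, List.mem_cons]
          constructor
          · intro hh
            rcases Bool.or_eq_true_iff.mp hh with hh | hh
            · exact Or.inl (eq_of_beq hh)
            · exact Or.inr ((hinv q').mp hh)
          · rintro (rfl | hseen)
            · simp
            · rw [(hinv q').mpr hseen, Bool.or_true])]
      rw [PySem.Dict.items_insert_of_not_contains _ _ hc]
      simp

-- invariant for B's second pass (fresh distinct header keys append in order)
theorem pvB2 (sl : List String) (l : List (String × String)) (d : PySem.Dict String String)
    (hfresh : ∀ p ∈ l, d.contains p.2 = false)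
    (hnd : (l.map Prod.snd).Nodup) :
    (l.foldl (fun d p => if sl.any (fun s => PySem.Str.isIn s p.1) then d.insert p.2 p.1 else d) d).items =
      d.items ++ (l.filter (fun p => sl.any (fun s => PySem.Str.isIn s p.1))).map (fun p => (p.2, p.1)) := by
  induction l generalizing d with
  | nil => simp
  | cons p rest ih =>
    obtain ⟨q, h⟩ := p
    simp only [List.map_cons, List.nodup_cons, List.mem_map] at hnd
    simp only [List.foldl_cons, List.filter_cons]
    by_cases hm : (sl.any (fun s => PySem.Str.isIn s q)) = true
    · rw [hm, if_pos rfl, if_pos rfl]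
      simp only [List.map_cons]
      rw [ih (d.insert h q)
        (by
          intro p' hp'
          rw [PySem.Dict.contains_insert]
          have h1 : (p'.2 == h) = false := by
            simp only [beq_eq_false_iff_ne, ne_eq]
            intro heq
            exact hnd.1 ⟨p', hp', heq⟩
          rw [h1, hfresh p' (List.mem_cons_of_mem _ hp')]; rfl)
        hnd.2]
      rw [PySem.Dict.items_insert_of_not_contains _ _ (hfresh (q, h) List.mem_cons_self)]
      simp
    · rw [Bool.not_eq_true] at hm
      rw [hm, if_neg Bool.false_ne_true, if_neg Bool.false_ne_true]
      exact ih d (fun p hp => hfresh p (List.mem_cons_of_mem _ hp)) hnd.2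

-- the headers emitted by pvRefAll form a sublist of fd's headers
theorem pvRefAll_snd_sublist (fd : List (String × String)) (seen : List String) :
    ((pvRefAll seen fd).map Prod.snd).Sublist (fd.map Prod.fst) := by
  induction fd generalizing seen with
  | nil => simp [pvRefAll]
  | cons p rest ih =>
    obtain ⟨h, q⟩ := p
    rw [pvRefAll]
    by_cases hqs : q ∈ seen
    · rw [if_pos hqs]; exact (ih seen).cons _
    · rw [if_neg hqs]; exact (ih (q :: seen)).cons₂ _

theorem create_filtered_fasta_eq (fd : List (String × String)) (sl : List String)
    (hnd : (fd.map Prod.fst).Nodup) :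
    create_filtered_fasta fd sl = create_filtered_fasta_alt fd sl := by
  unfold create_filtered_fasta create_filtered_fasta_alt
  rw [pvA_inv sl fd _ []
    (by
      intro q
      constructor
      · intro hq
        rw [PySem.Set.contains_iff] at hq
        exact absurd hq (by simp [PySem.Set.empty])
      · rintro ⟨hmem, _⟩; cases hmem)
    (by intro p _; exact PySem.Dict.contains_empty p.1) hnd]
  rw [pvB1 fd PySem.Dict.empty []
    (by
      intro q
      rw [PySem.Dict.contains_empty]
      simp)]
  rw [show (PySem.Dict.empty : PySem.Dict String String).items = [] from rfl, List.nil_append, List.nil_append]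
  rw [pvB2 sl (pvRefAll [] fd) PySem.Dict.empty
    (by intro p _; exact PySem.Dict.contains_empty p.2)
    ((pvRefAll_snd_sublist fd []).nodup hnd)]
  rfl

-- ===== VERDICT (by name: the statement is the Claim_ definition above) =====
theorem create_filtered_fasta_spec : Claim_equal_create_filtered_fasta := by
  intro fd sl _ hpre
  unfold Spec_create_filtered_fasta
  exact create_filtered_fasta_eq fd sl hpre
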